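-- pv_equiv track=rewrite | github.com/lopezjronald/Python-Crash-Course | Ch_4/practice.py | alternatingSort
-- ===== SOURCE A (Python) =====
-- def alternatingSort(a):
--     if len(a) == 1:
--         return True
--
--     odd_num = 0
--     if (len(a) % 2 == 1):
--         odd_num = int(len(a) / 2)
--         odd_num += 1
--
--     arr = a[:]
--     b = []
--
--     if (len(a) % 2 == 0):
--         for i in range(int(len(arr) / 2)):
--             b.append(arr[i])
--             b.append(arr.pop())
--     else:
--         for i in range(odd_num):
--             if i == odd_num - 1:
--                 b.append(arr[i])
--             else:
--                 b.append(arr[i])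
--                 b.append(arr.pop())
--     return (sorted(a) == b and len(sorted(a)) == len(b))
-- ===== SOURCE B (Python) =====
-- def alternatingSort(a):
--     s = sorted(a)
--     n = len(a)
--     for i in range(n // 2):
--         if s[2 * i] != a[i] or s[2 * i + 1] != a[n - 1 - i]:
--             return False
--     if n % 2 == 1 and s[n - 1] != a[n // 2]:
--         return False
--     return True
-- ===== Notes on version B (the rewrite author's own statement) =====
-- stated objective: simpler
-- what changed: B never materializes the interleaved list by index-and-pop mutation: it sorts once and checks sorted(a) position by position against a[i] and a[n-1-i] with index arithmetic, returning False on the first mismatch.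
import Mathlib
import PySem

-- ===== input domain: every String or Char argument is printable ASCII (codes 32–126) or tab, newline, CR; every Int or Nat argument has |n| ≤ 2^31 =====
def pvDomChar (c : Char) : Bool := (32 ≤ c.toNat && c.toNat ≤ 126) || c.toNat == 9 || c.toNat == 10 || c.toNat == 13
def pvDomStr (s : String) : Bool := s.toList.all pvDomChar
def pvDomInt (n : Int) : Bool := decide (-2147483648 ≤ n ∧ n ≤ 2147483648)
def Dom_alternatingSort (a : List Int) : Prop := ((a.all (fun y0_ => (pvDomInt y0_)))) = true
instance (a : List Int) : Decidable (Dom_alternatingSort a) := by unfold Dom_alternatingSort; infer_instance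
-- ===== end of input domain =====

-- B checks sorted(a) element-wise against the front/back interleave with two indices instead of
-- materializing the interleaved list by mutation; objective: simpler (no speed claim).

-- ===== PORT A =====
-- loop body of the even-length loop: b.append(arr[i]); b.append(arr.pop())
-- (the `none` branch of pop? is unreachable: arr is nonempty at every iteration)
def pvBodyE (s : List Int × List Int) (i : Nat) : List Int × List Int :=
  let x := PySem.List.pyGetD s.1 (i : Int) 0
  match PySem.List.pop? s.1 with
  | some (v, rest) => (rest, s.2 ++ [x, v])
  | none => (s.1, s.2 ++ [x])

-- loop body of the odd-length loop (m = odd_num - 1)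
def pvBodyO (m : Nat) (s : List Int × List Int) (i : Nat) : List Int × List Int :=
  if i = m then (s.1, s.2 ++ [PySem.List.pyGetD s.1 (i : Int) 0])
  else pvBodyE s i

def alternatingSort (a : List Int) : Bool :=
  if a.length = 1 then true
  else
    let oddNum : Nat := if a.length % 2 = 1 then a.length / 2 + 1 else 0
    let arr := a  -- a[:] (no mutation of the input is observable; the copy is the loop's working list)
    let st :=
      if a.length % 2 = 0 then (List.range (a.length / 2)).foldl pvBodyE (arr, [])
      else (List.range oddNum).foldl (pvBodyO (oddNum - 1)) (arr, [])
    let b := st.2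
    ((PySem.List.sorted a (fun x => x) == b) &&
      ((PySem.List.sorted a (fun x => x)).length == b.length))

-- ===== PORT B =====
def alternatingSort_alt (a : List Int) : Bool :=
  let s := PySem.List.sorted a (fun x => x)
  let n := a.length
  if (List.range (n / 2)).all (fun i =>
      (PySem.List.pyGetD s (2 * (i : Int)) 0 == PySem.List.pyGetD a (i : Int) 0) &&
      (PySem.List.pyGetD s (2 * (i : Int) + 1) 0 == PySem.List.pyGetD a ((n : Int) - 1 - (i : Int)) 0))
  then
    if (n % 2 == 1) && !(PySem.List.pyGetD s ((n : Int) - 1) 0 == PySem.List.pyGetD a ((n / 2 : Nat) : Int) 0)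
    then false
    else true
  else false

-- ===== PRECONDITION & SPEC =====
def Spec_alternatingSort (a : List Int) (out : Bool) : Prop := out = alternatingSort_alt a
instance (a : List Int) (out : Bool) : Decidable (Spec_alternatingSort a out) := by unfold Spec_alternatingSort; infer_instance

-- ===== CLAIM (what is proved, stated in full; the proofs are below) =====
def Claim_equal_alternatingSort : Prop := ∀ (a : List Int), Dom_alternatingSort a → Spec_alternatingSort a (alternatingSort a)


-- ===== LEMMAS AND PROOFS =====

-- the front/back interleave of the first k pairs
def pvInter (a : List Int) (k : Nat) : List Int :=
  (List.range k).flatMap (fun i => [a.getD i 0, a.getD (a.length - 1 - i) 0])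

-- the full interleaved list both programs compare sorted(a) against
def pvIvl (a : List Int) : List Int :=
  pvInter a (a.length / 2) ++ (if a.length % 2 = 1 then [a.getD (a.length / 2) 0] else [])

theorem pvInter_succ (a : List Int) (k : Nat) :
    pvInter a (k + 1) = pvInter a k ++ [a.getD k 0, a.getD (a.length - 1 - k) 0] := by
  simp [pvInter, List.range_succ]

theorem pvInter_length (a : List Int) (k : Nat) : (pvInter a k).length = 2 * k := by
  induction k with
  | zero => simp [pvInter]
  | succ k ih =>
    rw [pvInter_succ, List.length_append, ih]
    simp only [List.length_cons, List.length_nil]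
    omega

theorem pvIvl_length (a : List Int) : (pvIvl a).length = a.length := by
  unfold pvIvl
  rcases Nat.mod_two_eq_zero_or_one a.length with h | h <;> simp [h, pvInter_length] <;> omega

theorem pvInter_getD (a : List Int) (k j : Nat) (hj : j < 2 * k) :
    (pvInter a k).getD j 0 =
      if j % 2 = 0 then a.getD (j / 2) 0 else a.getD (a.length - 1 - j / 2) 0 := by
  induction k with
  | zero => omega
  | succ k ih =>
    rw [pvInter_succ]
    by_cases h : j < 2 * k
    · rw [List.getD_append _ _ _ _ (by rw [pvInter_length]; omega)]
      exact ih h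
    · rw [List.getD_append_right _ _ _ _ (by rw [pvInter_length]; omega), pvInter_length]
      have h2 : j = 2 * k ∨ j = 2 * k + 1 := by omega
      rcases h2 with h2 | h2 <;> subst h2
      · rw [if_pos (by omega)]
        rw [show 2 * k - 2 * k = 0 from by omega]
        simp only [List.getD_cons_zero]
        congr 1; omega
      · rw [if_neg (by omega)]
        rw [show 2 * k + 1 - 2 * k = 1 from by omega]
        simp only [List.getD_cons_succ, List.getD_cons_zero]
        congr 2; omega

theorem pvPop_of_ne_nil (xs : List Int) (h : xs ≠ []) :
    PySem.List.pop? xs = some (xs.getD (xs.length - 1) 0, xs.dropLast) := by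
  have hl : 1 ≤ xs.length := List.length_pos_iff.mpr h
  simp [PySem.List.pop?, PySem.List.pyIdx?, hl]
  rw [List.getElem?_eq_getElem (by omega)]
  simp

theorem pvGetD_take (l : List Int) (m k : Nat) (h : k < m) :
    (l.take m).getD k 0 = l.getD k 0 := by
  simp [List.getD_eq_getElem?_getD, h]

theorem pvDropLast_take (l : List Int) (m : Nat) (hm : m ≤ l.length) :
    (l.take m).dropLast = l.take (m - 1) := by
  rw [List.dropLast_eq_take, List.take_take]; congr 1; simp [List.length_take]; omega

-- loop invariant of A's even-style body: after k iterations arr = a[:n-k], b = first k pairs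
theorem pvFoldE (a : List Int) (k : Nat) (hk : 2 * k ≤ a.length) :
    (List.range k).foldl pvBodyE (a, []) = (a.take (a.length - k), pvInter a k) := by
  induction k with
  | zero => simp [pvInter]
  | succ k ih =>
    rw [List.range_succ, List.foldl_append, ih (by omega)]
    simp only [List.foldl_cons, List.foldl_nil]
    unfold pvBodyE
    have hne : a.take (a.length - k) ≠ [] := by
      intro hc
      have := congrArg List.length hc
      simp [List.length_take] at this
      omega
    have hTlen : (a.take (a.length - k)).length = a.length - k := by
      rw [List.length_take]; omega
    rw [pvPop_of_ne_nil _ hne]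
    simp only [PySem.List.pyGetD_natCast, hTlen]
    rw [pvGetD_take _ _ _ (by omega), pvGetD_take _ _ _ (by omega),
        pvDropLast_take _ _ (by omega)]
    rw [pvInter_succ]
    rw [show a.length - k - 1 = a.length - 1 - k from by omega,
        show a.length - (k + 1) = a.length - 1 - k from by omega]

-- both programs return 'sorted(a) equals the interleave': the final comparison of A
theorem pvFinal (a b : List Int) (hb : b = pvIvl a) :
    ((PySem.List.sorted a (fun x => x) == b) &&
      ((PySem.List.sorted a (fun x => x)).length == b.length)) =
      decide (PySem.List.sorted a (fun x => x) = pvIvl a) := by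
  subst hb
  by_cases he : PySem.List.sorted a (fun x => x) = pvIvl a <;> simp [he]

theorem pvA_char (a : List Int) :
    alternatingSort a = decide (PySem.List.sorted a (fun x => x) = pvIvl a) := by
  by_cases h1 : a.length = 1
  · obtain ⟨x, hx⟩ : ∃ x, a = [x] := List.length_eq_one_iff.mp h1
    subst hx
    have hs : PySem.List.sorted [x] (fun y => y) = [x] :=
      List.perm_singleton.mp (PySem.List.sorted_perm [x] _ _)
    simp [alternatingSort, pvIvl, pvInter, hs]
  · by_cases h2 : a.length % 2 = 0
    · have hodd : ¬ a.length % 2 = 1 := by omega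
      simp only [alternatingSort, if_neg h1, if_neg hodd, if_pos h2]
      rw [pvFoldE a (a.length / 2) (by omega)]
      exact pvFinal _ _ (by simp [pvIvl, hodd])
    · have h2' : a.length % 2 = 1 := by omega
      simp only [alternatingSort, if_neg h1, if_pos h2', if_neg h2]
      rw [Nat.add_sub_cancel]
      rw [List.range_succ, List.foldl_append]
      have hcong : (List.range (a.length / 2)).foldl (pvBodyO (a.length / 2)) (a, []) =
          (List.range (a.length / 2)).foldl pvBodyE (a, []) := by
        apply PySem.List.foldl_congr_mem
        intro acc x hx
        rw [List.mem_range] at hx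
        simp [pvBodyO, Nat.ne_of_lt hx]
      rw [hcong, pvFoldE a (a.length / 2) (by omega)]
      simp only [List.foldl_cons, List.foldl_nil, pvBodyO]
      simp only [PySem.List.pyGetD_natCast]
      rw [pvGetD_take _ _ _ (by omega)]
      exact pvFinal _ _ (by simp [pvIvl, h2'])

theorem pvIvl_getD_even (a : List Int) (i : Nat) (hi : i < a.length / 2) :
    (pvIvl a).getD (2 * i) 0 = a.getD i 0 := by
  unfold pvIvl
  rw [List.getD_append _ _ _ _ (by rw [pvInter_length]; omega)]
  rw [pvInter_getD _ _ _ (by omega), if_pos (by omega)]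
  congr 1; omega

theorem pvIvl_getD_odd (a : List Int) (i : Nat) (hi : i < a.length / 2) :
    (pvIvl a).getD (2 * i + 1) 0 = a.getD (a.length - 1 - i) 0 := by
  unfold pvIvl
  rw [List.getD_append _ _ _ _ (by rw [pvInter_length]; omega)]
  rw [pvInter_getD _ _ _ (by omega), if_neg (by omega)]
  congr 2; omega

theorem pvIvl_getD_mid (a : List Int) (h : a.length % 2 = 1) :
    (pvIvl a).getD (a.length - 1) 0 = a.getD (a.length / 2) 0 := by
  unfold pvIvl
  rw [List.getD_append_right _ _ _ _ (by rw [pvInter_length]; omega), pvInter_length]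
  rw [show a.length - 1 - 2 * (a.length / 2) = 0 from by omega]
  simp [h]

theorem pvB_char (a : List Int) :
    alternatingSort_alt a = decide (PySem.List.sorted a (fun x => x) = pvIvl a) := by
  have hs : (PySem.List.sorted a (fun x => x)).length = a.length :=
    PySem.List.length_sorted a _ _
  have hivl : (pvIvl a).length = a.length := pvIvl_length a
  have key : alternatingSort_alt a = true ↔ PySem.List.sorted a (fun x => x) = pvIvl a := by
    simp only [alternatingSort_alt]
    constructor
    · intro hB
      split at hB
      case isFalse => exact absurd hB (by simp)
      case isTrue hc1 =>
        split at hB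
        case isTrue => exact absurd hB (by simp)
        case isFalse hc2 =>
          rw [List.all_eq_true] at hc1
          apply List.ext_getElem (by omega)
          intro j hj hj'
          rw [← List.getD_eq_getElem _ 0, ← List.getD_eq_getElem _ 0]
          by_cases hj2 : j < 2 * (a.length / 2)
          · have hhalf : j / 2 < a.length / 2 := by omega
            have hc := hc1 (j / 2) (by rw [List.mem_range]; omega)
            rw [Bool.and_eq_true, beq_iff_eq, beq_iff_eq] at hc
            simp only [PySem.List.pyGetD_natCast] at hc
            rw [show (2 : Int) * (j / 2 : Nat) + 1 = ((2 * (j / 2) + 1 : Nat) : Int) from by omega,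
                PySem.List.pyGetD_natCast] at hc
            rw [show (2 : Int) * (j / 2 : Nat) = ((2 * (j / 2) : Nat) : Int) from by omega,
                PySem.List.pyGetD_natCast] at hc
            rw [show (a.length : Int) - 1 - (j / 2 : Nat) = ((a.length - 1 - j / 2 : Nat) : Int) from by omega,
                PySem.List.pyGetD_natCast] at hc
            rcases (by omega : j = 2 * (j / 2) ∨ j = 2 * (j / 2) + 1) with he | he
            · rw [he, pvIvl_getD_even a (j / 2) hhalf]; rw [he] at hc ⊢; exact hc.1
            · rw [he, pvIvl_getD_odd a (j / 2) hhalf]; rw [he] at hc ⊢; exact hc.2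
          · have hodd : a.length % 2 = 1 := by omega
            have hjlast : j = a.length - 1 := by omega
            simp only [hodd, Nat.reduceBeqDiff, Bool.true_and, Bool.not_eq_eq_eq_not,
              Bool.not_true, Bool.not_eq_false, beq_iff_eq] at hc2
            rw [show (a.length : Int) - 1 = ((a.length - 1 : Nat) : Int) from by omega,
                PySem.List.pyGetD_natCast, PySem.List.pyGetD_natCast] at hc2
            rw [hjlast, pvIvl_getD_mid a hodd, hc2]
    · intro he
      have hall : (List.range (a.length / 2)).all (fun i =>
          (PySem.List.pyGetD (PySem.List.sorted a fun x => x) (2 * (i : Int)) 0 ==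
            PySem.List.pyGetD a (i : Int) 0) &&
          (PySem.List.pyGetD (PySem.List.sorted a fun x => x) (2 * (i : Int) + 1) 0 ==
            PySem.List.pyGetD a ((a.length : Int) - 1 - (i : Int)) 0)) = true := by
        rw [List.all_eq_true]
        intro i hi
        rw [List.mem_range] at hi
        rw [Bool.and_eq_true, beq_iff_eq, beq_iff_eq]
        simp only [PySem.List.pyGetD_natCast]
        rw [show (2 : Int) * (i : Nat) + 1 = ((2 * i + 1 : Nat) : Int) from by omega,
            PySem.List.pyGetD_natCast]
        rw [show (2 : Int) * (i : Nat) = ((2 * i : Nat) : Int) from by omega,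
            PySem.List.pyGetD_natCast]
        rw [show (a.length : Int) - 1 - (i : Nat) = ((a.length - 1 - i : Nat) : Int) from by omega,
            PySem.List.pyGetD_natCast]
        rw [he]
        exact ⟨pvIvl_getD_even a i hi, pvIvl_getD_odd a i hi⟩
      rw [if_pos hall]
      split
      case isFalse => rfl
      case isTrue hc2 =>
        simp only [Bool.and_eq_true, beq_iff_eq, Bool.not_eq_eq_eq_not, Bool.not_true,
          beq_eq_false_iff_ne, ne_eq] at hc2
        obtain ⟨hodd, hne⟩ := hc2
        exfalso
        apply hne
        simp only [PySem.List.pyGetD_natCast]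
        rw [show (a.length : Int) - 1 = ((a.length - 1 : Nat) : Int) from by omega,
            PySem.List.pyGetD_natCast]
        rw [he, pvIvl_getD_mid a hodd]
  by_cases he : PySem.List.sorted a (fun x => x) = pvIvl a
  · simp only [he, decide_true]; exact key.mpr he
  · simp only [he, decide_false]
    cases hB : alternatingSort_alt a
    · rfl
    · exact absurd (key.mp hB) he

-- ===== VERDICT (by name: the statement is the Claim_ definition above) =====
theorem alternatingSort_spec : Claim_equal_alternatingSort := by
  intro a _
  unfold Spec_alternatingSort
  rw [pvA_char, pvB_char]
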